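-- pv_equiv track=rewrite | github.com/Jake-Liu-Robot/smart_feed_optimizaition | ratios.py | generate_ratios
-- ===== SOURCE A (Python) =====
-- from math import gcd
-- from functools import reduce
-- from itertools import product
--
-- def generate_ratios(n_streams: int, max_sum: int) -> list:
--     """
--     生成 n_streams 个分量的所有合法配比。
--
--     Args:
--         n_streams: 参与混合的废料流数量 (1-5)
--         max_sum: 配比总和上限，默认 11 (= F_total 取整)
--
--     Returns:
--         list of tuple[int, ...]: 所有合法配比
--
--     Example:
--         generate_ratios(2, 11) →
--         [(1,1), (1,2), (2,1), (1,3), (3,1), (2,3), (3,2), ...]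
--     """
--     if n_streams == 1:
--         return [(1,)]  # 单流只有一种配比
--
--     results = []
--     upper = max_sum - n_streams + 1  # 单个分量的最大值
--
--     for combo in product(range(1, upper + 1), repeat=n_streams):
--         if sum(combo) > max_sum:
--             continue
--         if reduce(gcd, combo) != 1:
--             continue
--         results.append(combo)
--
--     return results
-- ===== SOURCE B (Python) =====
-- from math import gcd
--
-- def generate_ratios(n_streams: int, max_sum: int) -> list:
--     """DFS with sum-bound pruning: enumerates only combos whose total can still
--     stay within max_sum, in the same lexicographic order as the full product scan."""
--     if n_streams == 1:
--         return [(1,)]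
--     upper = max_sum - n_streams + 1  # single component's max value
--
--     def dfs(k, rem, g):
--         # k slots left to fill, rem = budget left, g = gcd of the prefix
--         if k == 0:
--             return [()] if g == 1 else []
--         hi = min(upper, rem - (k - 1))  # leave >=1 for each remaining slot
--         out = []
--         for v in range(1, hi + 1):
--             for tail in dfs(k - 1, rem - v, gcd(g, v)):
--                 out.append((v,) + tail)
--         return out
--
--     return dfs(n_streams, max_sum, 0)
-- ===== Notes on version B (the rewrite author's own statement) =====
-- stated objective: alternative
-- what changed: Replaced the exhaustive scan of all upper^n_streams tuples (filtering each by sum and gcd afterwards) with a DFS that prunes each component's range by the remaining sum budget and threads the prefix gcd, emitting the same tuples in the same lexicographic order; intended as faster (it skips over-budget branches wholesale; measured 5.6x at the largest size both finished, unconfirmed beyond that).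
import Mathlib
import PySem

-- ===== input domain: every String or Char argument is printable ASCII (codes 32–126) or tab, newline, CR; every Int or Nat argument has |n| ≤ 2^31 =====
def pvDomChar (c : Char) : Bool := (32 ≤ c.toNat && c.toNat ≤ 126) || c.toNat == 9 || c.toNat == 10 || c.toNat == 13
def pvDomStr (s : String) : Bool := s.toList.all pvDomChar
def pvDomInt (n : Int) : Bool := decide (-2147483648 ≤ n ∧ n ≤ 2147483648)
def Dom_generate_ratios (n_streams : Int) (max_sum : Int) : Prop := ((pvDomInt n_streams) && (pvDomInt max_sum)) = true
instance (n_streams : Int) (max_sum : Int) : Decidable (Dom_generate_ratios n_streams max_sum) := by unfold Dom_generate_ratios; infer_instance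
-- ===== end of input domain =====

-- B replaces A's exhaustive product scan (filtering by sum and gcd afterwards) with a
-- DFS that prunes by the remaining sum budget, producing the same list in the same order.

-- math.gcd on ints (arguments here are always ≥ 0)
def gcdI (a b : Int) : Int := (Int.gcd a b : Int)

-- ===== PORT A =====
-- itertools.product(range(1, upper+1), repeat=k): leftmost component varies slowest
def pyProd (base : List Int) : Nat → List (List Int)
  | 0 => [[]]
  | k + 1 => base.flatMap (fun x => (pyProd base k).map (fun t => x :: t))

-- functools.reduce(gcd, combo); Python raises TypeError on an empty tuple (excluded by Pre_)
def reduceGcd : List Int → Int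
  | [] => 0
  | c :: cs => cs.foldl gcdI c

-- sum(combo)
def sumI (c : List Int) : Int := c.foldl (· + ·) 0

def generate_ratios (n_streams : Int) (max_sum : Int) : List (List Int) :=
  if n_streams = 1 then [[1]]
  else
    let upper := max_sum - n_streams + 1
    (pyProd (PySem.List.pyRange 1 (upper + 1) 1) n_streams.toNat).foldl
      (fun results combo =>
        if sumI combo > max_sum then results
        else if reduceGcd combo ≠ 1 then results
        else results ++ [combo]) []

-- ===== PORT B =====
-- dfs(k, rem, g): k slots left, rem = budget left, g = gcd of the prefix
def dfsB (upper : Int) : Nat → Int → Int → List (List Int)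
  | 0, _, g => if g = 1 then [[]] else []
  | k + 1, rem, g =>
    let hi := min upper (rem - (k : Int))
    (PySem.List.pyRange 1 (hi + 1) 1).flatMap
      (fun v => (dfsB upper k (rem - v) (gcdI g v)).map (fun t => v :: t))

def generate_ratios_alt (n_streams : Int) (max_sum : Int) : List (List Int) :=
  if n_streams = 1 then [[1]]
  else dfsB (max_sum - n_streams + 1) n_streams.toNat max_sum 0

-- ===== PRECONDITION & SPEC =====
-- Pre_ excludes the inputs where A raises: n_streams < 0 (ValueError from product's
-- negative repeat) and n_streams = 0 with max_sum ≥ 0 (TypeError from reduce on the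
-- empty tuple); n_streams = 0 with max_sum < 0, where A returns [], stays inside.
def Pre_generate_ratios (n_streams : Int) (max_sum : Int) : Prop :=
  1 ≤ n_streams ∨ (n_streams = 0 ∧ max_sum < 0)
instance (n_streams : Int) (max_sum : Int) : Decidable (Pre_generate_ratios n_streams max_sum) := by unfold Pre_generate_ratios; infer_instance
def pvWitness_generate_ratios : Int × Int := (2, 5)

def Spec_generate_ratios (n_streams : Int) (max_sum : Int) (out : List (List Int)) : Prop := out = generate_ratios_alt n_streams max_sum
instance (n_streams : Int) (max_sum : Int) (out : List (List Int)) : Decidable (Spec_generate_ratios n_streams max_sum out) := by unfold Spec_generate_ratios; infer_instance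

-- ===== CLAIM (what is proved, stated in full; the proofs are below) =====
def Claim_equal_generate_ratios : Prop := ∀ (n_streams : Int) (max_sum : Int), Dom_generate_ratios n_streams max_sum → Pre_generate_ratios n_streams max_sum → Spec_generate_ratios n_streams max_sum (generate_ratios n_streams max_sum)

-- ===== LEMMAS AND PROOFS =====

theorem sumI_cons (x : Int) (t : List Int) : sumI (x :: t) = x + sumI t := by
  have h : ∀ (l : List Int) (a b : Int), l.foldl (· + ·) (a + b) = a + l.foldl (· + ·) b := by
    intro l
    induction l with
    | nil => intro a b; rfl
    | cons y t ih => intro a b; simpa [List.foldl, add_assoc] using ih a (b + y)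
  simpa [sumI] using h t x 0

theorem flatMap_congr_mem {α β : Type} (l : List α) (f g : α → List β)
    (h : ∀ x ∈ l, f x = g x) : l.flatMap f = l.flatMap g := by
  induction l with
  | nil => rfl
  | cons y t ih =>
    simp only [List.flatMap_cons]
    rw [h y (by simp), ih (fun x hx => h x (by simp [hx]))]

theorem flatMap_filter_of_nil {α β : Type} (l : List α) (f : α → List β) (p : α → Bool)
    (h : ∀ x ∈ l, p x = false → f x = []) : l.flatMap f = (l.filter p).flatMap f := by
  induction l with
  | nil => rfl
  | cons y t ih =>
    have ih' := ih (fun x hx hp => h x (by simp [hx]) hp)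
    by_cases hp : p y = true
    · simp [hp, ih']
    · have : p y = false := by simpa using hp
      simp [this, h y (by simp) this, ih']

theorem filter_flatMapL {α β : Type} (l : List α) (f : α → List β) (p : β → Bool) :
    (l.flatMap f).filter p = l.flatMap (fun x => (f x).filter p) := by
  induction l with
  | nil => rfl
  | cons y t ih => simp [List.flatMap_cons, List.filter_append, ih]

theorem range_filter_le (hi u : Int) (h : hi ≤ u) :
    (PySem.List.pyRange 1 (u + 1) 1).filter (fun x => decide (x ≤ hi))
      = PySem.List.pyRange 1 (hi + 1) 1 := by
  by_cases h0 : 0 ≤ hi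
  · rw [PySem.List.pyRange_one_append 1 (hi + 1) (u + 1) (by omega) (by omega),
      List.filter_append]
    have h1 : List.filter (fun x => decide (x ≤ hi)) (PySem.List.pyRange 1 (hi + 1) 1)
        = PySem.List.pyRange 1 (hi + 1) 1 := by
      apply List.filter_eq_self.2
      intro x hx
      have := (PySem.List.mem_pyRange_one).1 hx
      simp only [decide_eq_true_eq]
      omega
    have h2 : List.filter (fun x => decide (x ≤ hi)) (PySem.List.pyRange (hi + 1) (u + 1) 1)
        = [] := by
      apply List.filter_eq_nil_iff.2
      intro x hx
      have := (PySem.List.mem_pyRange_one).1 hx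
      simp only [decide_eq_true_eq]
      omega
    rw [h1, h2, List.append_nil]
  · have hnil : PySem.List.pyRange 1 (hi + 1) 1 = [] :=
      PySem.List.pyRange_one_eq_nil (by omega)
    rw [hnil]
    apply List.filter_eq_nil_iff.2
    intro x hx
    have := (PySem.List.mem_pyRange_one).1 hx
    simp only [decide_eq_true_eq]
    omega

theorem mem_pyProd_sum_ge (u : Int) (k : Nat) (c : List Int)
    (hc : c ∈ pyProd (PySem.List.pyRange 1 (u + 1) 1) k) : (k : Int) ≤ sumI c := by
  induction k generalizing c with
  | zero => simp [pyProd] at hc; simp [hc, sumI]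
  | succ k ih =>
    simp only [pyProd, List.mem_flatMap, List.mem_map] at hc
    obtain ⟨x, hx, t, ht, rfl⟩ := hc
    have hx1 : 1 ≤ x := ((PySem.List.mem_pyRange_one).1 hx).1
    have := ih t ht
    rw [sumI_cons]
    push_cast
    omega

-- core: dfsB = filtered product, for any budget rem (nonneg when k = 0) and prefix gcd g
theorem dfsB_eq_filter (u : Int) (k : Nat) (rem g : Int) (h0 : k = 0 → 0 ≤ rem) :
    dfsB u k rem g
      = (pyProd (PySem.List.pyRange 1 (u + 1) 1) k).filter
          (fun c => decide (sumI c ≤ rem) && decide (c.foldl gcdI g = 1)) := by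
  induction k generalizing rem g with
  | zero =>
    have hr : 0 ≤ rem := h0 rfl
    by_cases hg : g = 1 <;>
      simp [dfsB, pyProd, List.filter, sumI, hg, hr]
  | succ k ih =>
    have hq : ∀ v : Int,
        ((pyProd (PySem.List.pyRange 1 (u + 1) 1) k).map (fun t => v :: t)).filter
            (fun c => decide (sumI c ≤ rem) && decide (c.foldl gcdI g = 1))
          = ((pyProd (PySem.List.pyRange 1 (u + 1) 1) k).filter
              (fun c => decide (sumI c ≤ rem - v) && decide (c.foldl gcdI (gcdI g v) = 1))).map
              (fun t => v :: t) := by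
      intro v
      rw [List.filter_map]
      congr 1
      apply List.filter_congr
      intro c _
      simp only [Function.comp_apply, List.foldl_cons]
      congr 1
      exact decide_eq_decide.2 (by rw [sumI_cons]; constructor <;> (intro; omega))
    have hrhs : (pyProd (PySem.List.pyRange 1 (u + 1) 1) (k + 1)).filter
          (fun c => decide (sumI c ≤ rem) && decide (c.foldl gcdI g = 1))
        = (PySem.List.pyRange 1 (u + 1) 1).flatMap
            (fun v => ((pyProd (PySem.List.pyRange 1 (u + 1) 1) k).filter
              (fun c => decide (sumI c ≤ rem - v) && decide (c.foldl gcdI (gcdI g v) = 1))).map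
              (fun t => v :: t)) := by
      rw [pyProd, filter_flatMapL]
      simp only [hq]
    rw [hrhs]
    rw [flatMap_filter_of_nil (PySem.List.pyRange 1 (u + 1) 1) _
        (fun v => decide (v ≤ min u (rem - (k : Int))))
        (by
          intro v hv hvf
          have hb := (PySem.List.mem_pyRange_one).1 hv
          simp only [decide_eq_false_iff_not] at hvf
          have hv2 : rem - (k : Int) < v := by omega
          rw [List.filter_eq_nil_iff.2, List.map_nil]
          intro c hc
          have := mem_pyProd_sum_ge u k c hc
          simp only [Bool.and_eq_true, decide_eq_true_eq, not_and]
          intro hs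
          omega)]
    rw [range_filter_le (min u (rem - (k : Int))) u (min_le_left _ _)]
    show dfsB u (k + 1) rem g = _
    simp only [dfsB]
    apply flatMap_congr_mem
    intro v hv
    have hb := (PySem.List.mem_pyRange_one).1 hv
    rw [ih (rem - v) (gcdI g v) (by intro hk0; omega)]

theorem foldl_filterA (M : Int) (l : List (List Int)) (acc : List (List Int)) :
    l.foldl (fun results combo =>
        if sumI combo > M then results
        else if reduceGcd combo ≠ 1 then results
        else results ++ [combo]) acc
      = acc ++ l.filter (fun c => decide (sumI c ≤ M) && decide (reduceGcd c = 1)) := by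
  induction l generalizing acc with
  | nil => simp
  | cons c t ih =>
    rw [List.foldl_cons, List.filter_cons]
    by_cases h1 : sumI c > M
    · have hp : (decide (sumI c ≤ M) && decide (reduceGcd c = 1)) = false := by
        simp only [Bool.and_eq_false_iff, decide_eq_false_iff_not]; left; omega
      rw [if_pos h1, hp, ih]
      simp
    · by_cases h2 : reduceGcd c = 1
      · have hp : (decide (sumI c ≤ M) && decide (reduceGcd c = 1)) = true := by
          simp only [Bool.and_eq_true, decide_eq_true_eq]
          exact ⟨by omega, h2⟩
        rw [if_neg h1, if_neg (by simp [h2]), hp, ih]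
        simp
      · have hp : (decide (sumI c ≤ M) && decide (reduceGcd c = 1)) = false := by
          simp [h2]
        rw [if_neg h1, if_pos (by simp [h2]), hp, ih]
        simp

theorem gcdI_zero (x : Int) (hx : 0 ≤ x) : gcdI 0 x = x := by
  simp [gcdI, Int.gcd]
  omega

theorem reduceGcd_eq_foldl (c : List Int) (hne : c ≠ []) (hpos : ∀ x ∈ c, 1 ≤ x) :
    reduceGcd c = c.foldl gcdI 0 := by
  match c, hne with
  | x :: t, _ =>
    have hx : 1 ≤ x := hpos x (by simp)
    simp [reduceGcd, List.foldl_cons, gcdI_zero x (by omega)]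

theorem mem_pyProd_pos (u : Int) (k : Nat) (c : List Int)
    (hc : c ∈ pyProd (PySem.List.pyRange 1 (u + 1) 1) k) : ∀ x ∈ c, 1 ≤ x := by
  induction k generalizing c with
  | zero =>
    simp [pyProd] at hc
    simp [hc]
  | succ k ih =>
    simp only [pyProd, List.mem_flatMap, List.mem_map] at hc
    obtain ⟨x, hx, t, ht, rfl⟩ := hc
    intro y hy
    rcases List.mem_cons.1 hy with h | h
    · exact h ▸ ((PySem.List.mem_pyRange_one).1 hx).1
    · exact ih t ht y h

-- ===== VERDICT (by name: the statement is the Claim_ definition above) =====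
theorem generate_ratios_spec : Claim_equal_generate_ratios := by
  intro n m _ hpre
  unfold Spec_generate_ratios
  by_cases h1 : n = 1
  · simp [generate_ratios, generate_ratios_alt, h1]
  · rcases hpre with hn | ⟨hn0, hm⟩
    · have h2 : 2 ≤ n := by omega
      obtain ⟨j, hj⟩ : ∃ j, n.toNat = j + 1 := ⟨n.toNat - 1, by omega⟩
      simp only [generate_ratios, generate_ratios_alt, if_neg h1]
      rw [foldl_filterA, List.nil_append, hj,
        dfsB_eq_filter (m - n + 1) (j + 1) m 0 (by simp)]
      apply List.filter_congr
      intro c hc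
      have hsh := hc
      simp only [pyProd, List.mem_flatMap, List.mem_map] at hsh
      obtain ⟨x, hx, t, ht, rfl⟩ := hsh
      rw [reduceGcd_eq_foldl (x :: t) (by simp) (mem_pyProd_pos _ (j + 1) _ hc)]
    · subst hn0
      simp only [generate_ratios, generate_ratios_alt, if_neg h1, Int.toNat_zero]
      simp [pyProd, dfsB, sumI]
      omega
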